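-- pv_equiv track=rewrite | github.com/dmitryzy/termod | mod_chem_termod.py | to_formula
-- ===== SOURCE A (Python) =====
-- def to_formula(frm,prn_format='html'):
--     '''Возвращает html представление формулы вещества
--     frm - строка формулы вещества ('Fe2O3','Fe2(SO4)3',...)
--     prn_format - параметр, определяющий представление фомулы ('html', 'tex', 'txt')'''
--     #
--     if prn_format=='txt':
--         res=frm.strip()
--     else:
--         if prn_format=='html':
--             sep_begin='<sub>'
--             sep_end='</sub>'
--         elif prn_format=='tex':
--             sep_begin='_{'
--             sep_end='}'
--         #
--         sumbols=list(frm+' ')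
--         res=''
--         i_begin=0
--         i_end=len(sumbols)-1
--         for i in range(i_begin,i_end):
--             s1=sumbols[i]
--             s2=sumbols[i+1]
--             if (not s1.isdigit())and(s2.isdigit()):
--                 res+=s1+sep_begin
--             elif(s1.isdigit())and(not s2.isdigit()):
--                 res+=s1+sep_end
--             else:
--                 res+=s1
--     return res
-- ===== SOURCE B (Python) =====
-- def to_formula(frm, prn_format='html'):
--     if prn_format == 'txt':
--         return frm.strip()
--     if prn_format == 'html':
--         sep_begin, sep_end = '<sub>', '</sub>'
--     elif prn_format == 'tex':
--         sep_begin, sep_end = '_{', '}'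
--     pieces = []
--     i, n = 0, len(frm)
--     while i < n:
--         if frm[i].isdigit():
--             j = i + 1
--             while j < n and frm[j].isdigit():
--                 j += 1
--             pieces.append(sep_begin + frm[i:j] + sep_end)
--             i = j
--         else:
--             pieces.append(frm[i])
--             i += 1
--     return ''.join(pieces)
-- ===== Notes on version B (the rewrite author's own statement) =====
-- stated objective: alternative
-- what changed: B replaces A's char-by-char digit/non-digit transition scan over the sentinel-padded string by grouping each maximal digit run (inner run scan) and wrapping the run in the delimiters.
-- intended difference: On html and tex inputs whose formula starts with a digit, A omits the opening subscript delimiter before the leading digit run, yielding unbalanced markup; B wraps that run in both delimiters, which is the intended output. — e.g. on to_formula("2O", "html"): A returns "2</sub>O", B returns "<sub>2</sub>O"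
import Mathlib
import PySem

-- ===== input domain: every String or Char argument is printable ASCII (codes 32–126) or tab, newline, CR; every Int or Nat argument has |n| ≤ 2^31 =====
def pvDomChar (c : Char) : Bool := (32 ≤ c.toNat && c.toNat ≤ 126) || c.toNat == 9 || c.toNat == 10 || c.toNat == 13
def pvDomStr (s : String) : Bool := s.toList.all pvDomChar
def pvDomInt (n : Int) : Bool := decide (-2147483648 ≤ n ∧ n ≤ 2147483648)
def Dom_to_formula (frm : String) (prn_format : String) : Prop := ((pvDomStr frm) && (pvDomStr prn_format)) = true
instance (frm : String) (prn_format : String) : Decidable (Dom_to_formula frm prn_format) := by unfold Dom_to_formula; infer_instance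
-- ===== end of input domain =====

-- B replaces A's char-by-char digit/non-digit transition scan by grouping each maximal
-- digit run and wrapping it in the delimiters (objective: alternative, not faster); B also
-- wraps a leading digit run, where A drops the opening delimiter (see D_ below).

-- ===== PORT A =====
-- A's loop 'for i in range(0, len(sumbols)-1)' looks at sumbols[i], sumbols[i+1];
-- ported as the structural recursion over adjacent pairs of the same char list (exact).
def toFormulaScanA (sb se : List Char) : List Char → List Char
  | s1 :: s2 :: rest =>
      (if (!PySem.Chars.isdigit s1) && PySem.Chars.isdigit s2 then s1 :: sb
       else if PySem.Chars.isdigit s1 && !PySem.Chars.isdigit s2 then s1 :: se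
       else [s1]) ++ toFormulaScanA sb se (s2 :: rest)
  | _ => []

def to_formula (frm : String) (prn_format : String) : String :=
  if prn_format == "txt" then PySem.Str.strip frm
  else
    -- Python leaves sep_begin/sep_end unbound for unknown formats (UnboundLocalError when
    -- referenced); Pre_ excludes exactly those inputs, so the [] fallback is never claimed about.
    let sb := if prn_format == "html" then "<sub>".toList
              else if prn_format == "tex" then "_{".toList else []
    let se := if prn_format == "html" then "</sub>".toList
              else if prn_format == "tex" then "}".toList else []
    String.ofList (toFormulaScanA sb se (frm.toList ++ [' ']))

-- ===== PORT B =====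
-- B's while loop: take each maximal digit run (inner j-scan = takeWhile/dropWhile), wrap it.
def wrapRunsB (sb se : List Char) : List Char → List Char
  | [] => []
  | c :: cs =>
    if PySem.Chars.isdigit c then
      sb ++ (c :: cs.takeWhile PySem.Chars.isdigit) ++ se
         ++ wrapRunsB sb se (cs.dropWhile PySem.Chars.isdigit)
    else
      c :: wrapRunsB sb se cs
termination_by l => l.length
decreasing_by
  · simpa using Nat.lt_succ_of_le (List.length_dropWhile_le _ _)
  · simp

def to_formula_alt (frm : String) (prn_format : String) : String :=
  if prn_format == "txt" then PySem.Str.strip frm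
  else
    let sb := if prn_format == "html" then "<sub>".toList
              else if prn_format == "tex" then "_{".toList else []
    let se := if prn_format == "html" then "</sub>".toList
              else if prn_format == "tex" then "}".toList else []
    String.ofList (wrapRunsB sb se frm.toList)

-- ===== PRECONDITION & SPEC =====
-- Pre_ excludes unknown formats on formulas containing a digit: there A raises
-- UnboundLocalError (sep_begin/sep_end are never assigned).
def Pre_to_formula (frm : String) (prn_format : String) : Prop :=
  prn_format = "txt" ∨ prn_format = "html" ∨ prn_format = "tex"
    ∨ frm.toList.all (fun c => !PySem.Chars.isdigit c) = true
instance (frm : String) (prn_format : String) : Decidable (Pre_to_formula frm prn_format) := by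
  unfold Pre_to_formula; infer_instance

def pvWitness_to_formula : String × String := ("Fe2(SO4)3", "html")

-- On html and tex inputs whose formula starts with a digit, A omits the opening subscript
-- delimiter before the leading digit run, yielding unbalanced markup; B wraps that run in
-- both delimiters, which is the intended output.
def D_to_formula (frm : String) (prn_format : String) : Prop :=
  (prn_format = "html" ∨ prn_format = "tex")
    ∧ frm.toList.head?.any PySem.Chars.isdigit = true
instance (frm : String) (prn_format : String) : Decidable (D_to_formula frm prn_format) := by
  unfold D_to_formula; infer_instance

def Spec_to_formula (frm : String) (prn_format : String) (out : String) : Prop :=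
  ¬ D_to_formula frm prn_format → out = to_formula_alt frm prn_format
instance (frm : String) (prn_format : String) (out : String) : Decidable (Spec_to_formula frm prn_format out) := by
  unfold Spec_to_formula; infer_instance

def pvDiffWitness_to_formula : String × String := ("2O", "html")
def pvDiffWitnessOut_to_formula : String × String := ("2</sub>O", "<sub>2</sub>O")

-- ===== CLAIM (what is proved, stated in full; the proofs are below) =====
def Claim_unchanged_to_formula : Prop := ∀ (frm : String) (prn_format : String), Dom_to_formula frm prn_format → Pre_to_formula frm prn_format → Spec_to_formula frm prn_format (to_formula frm prn_format)
def Claim_changed_to_formula : Prop := Dom_to_formula (pvDiffWitness_to_formula.1) (pvDiffWitness_to_formula.2) ∧ Pre_to_formula (pvDiffWitness_to_formula.1) (pvDiffWitness_to_formula.2) ∧ D_to_formula (pvDiffWitness_to_formula.1) (pvDiffWitness_to_formula.2) ∧ to_formula (pvDiffWitness_to_formula.1) (pvDiffWitness_to_formula.2) = pvDiffWitnessOut_to_formula.1 ∧ to_formula_alt (pvDiffWitness_to_formula.1) (pvDiffWitness_to_formula.2) = pvDiffWitnessOut_to_formula.2 ∧ pvDiffWitnessOut_to_formula.1 ≠ 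pvDiffWitnessOut_to_formula.2
def Claim_exact_to_formula : Prop := ∀ (frm : String) (prn_format : String), Dom_to_formula frm prn_format → Pre_to_formula frm prn_format → D_to_formula frm prn_format → to_formula frm prn_format ≠ to_formula_alt frm prn_format

-- ===== LEMMAS AND PROOFS =====

-- Joint invariant of the two traversals, by strong induction on the list length:
-- (aux) on a digit-headed list A's pair scan emits the head, the rest of the run, the closing
--       delimiter, then proceeds like B; (main) on an empty or non-digit-headed list the two agree.
lemma scan_eq_wrap_joint (n : Nat) : ∀ (sb se : List Char) (l : List Char), l.length ≤ n →
    ((∀ c cs, l = c :: cs → PySem.Chars.isdigit c = true →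
        toFormulaScanA sb se (l ++ [' ']) =
          c :: (cs.takeWhile PySem.Chars.isdigit ++ se
            ++ wrapRunsB sb se (cs.dropWhile PySem.Chars.isdigit)))
     ∧ ((∀ c cs, l = c :: cs → PySem.Chars.isdigit c = false) →
        toFormulaScanA sb se (l ++ [' ']) = wrapRunsB sb se l)) := by
  induction n with
  | zero =>
    intro sb se l hl
    have : l = [] := List.length_eq_zero_iff.mp (Nat.le_zero.mp hl)
    subst this
    refine ⟨by intro c cs h; simp at h, ?_⟩
    intro _
    simp [toFormulaScanA, wrapRunsB]
  | succ n ih =>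
    intro sb se l hl
    constructor
    · intro c cs hlc hc
      subst hlc
      have hcs : cs.length ≤ n := by simpa using hl
      cases cs with
      | nil =>
        simp [toFormulaScanA, wrapRunsB, hc,
              show PySem.Chars.isdigit ' ' = false from by decide]
      | cons e rest =>
        by_cases he : PySem.Chars.isdigit e = true
        · have := (ih sb se (e :: rest) hcs).1 e rest rfl he
          simp only [List.cons_append, toFormulaScanA, hc, he] at this ⊢
          simp [this, he]
        · have hnd : ∀ c' cs', e :: rest = c' :: cs' → PySem.Chars.isdigit c' = false := by
            intro c' cs' h; cases h; simpa using he
          have := (ih sb se (e :: rest) hcs).2 hnd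
          simp only [List.cons_append, toFormulaScanA, hc] at this ⊢
          simp only [Bool.eq_false_iff] at he
          simp [this, Bool.eq_false_iff.mpr he]
    · intro hnd
      cases l with
      | nil => simp [toFormulaScanA, wrapRunsB]
      | cons c cs =>
        have hc : PySem.Chars.isdigit c = false := hnd c cs rfl
        have hcs : cs.length ≤ n := by simpa using hl
        cases cs with
        | nil =>
          simp [toFormulaScanA, wrapRunsB, hc,
                show PySem.Chars.isdigit ' ' = false from by decide]
        | cons e rest =>
          by_cases he : PySem.Chars.isdigit e = true
          · have := (ih sb se (e :: rest) hcs).1 e rest rfl he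
            simp only [List.cons_append, toFormulaScanA, hc, he] at this ⊢
            simp [this, wrapRunsB, hc, he]
          · have hnd' : ∀ c' cs', e :: rest = c' :: cs' → PySem.Chars.isdigit c' = false := by
              intro c' cs' h; cases h; simpa using he
            have := (ih sb se (e :: rest) hcs).2 hnd'
            simp only [List.cons_append, toFormulaScanA, hc] at this ⊢
            simp only [Bool.eq_false_iff] at he
            simp [this, wrapRunsB, hc, Bool.eq_false_iff.mpr he]

lemma scan_eq_wrap (sb se : List Char) (l : List Char)
    (h : ∀ c cs, l = c :: cs → PySem.Chars.isdigit c = false) :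
    toFormulaScanA sb se (l ++ [' ']) = wrapRunsB sb se l :=
  (scan_eq_wrap_joint l.length sb se l le_rfl).2 h

-- ===== VERDICT (by name: the statement is the Claim_ definition above) =====
theorem to_formula_spec : Claim_unchanged_to_formula := by
  intro frm fmt _ hpre hD
  by_cases htxt : fmt == "txt"
  · simp [to_formula, to_formula_alt, htxt]
  · have hhead : ∀ c cs, frm.toList = c :: cs → PySem.Chars.isdigit c = false := by
      intro c cs h
      by_contra hc
      simp only [Bool.not_eq_false] at hc
      by_cases hh : fmt = "html"
      · exact hD ⟨Or.inl hh, by simp [h, hc]⟩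
      · by_cases ht : fmt = "tex"
        · exact hD ⟨Or.inr ht, by simp [h, hc]⟩
        · -- unknown format: Pre_ says frm has no digit
          rcases hpre with h1 | h1 | h1 | h1
          · exact htxt (by simp [h1])
          · exact hh h1
          · exact ht h1
          · have := List.all_eq_true.mp h1 c (by simp [h])
            simp [hc] at this
    simp only [to_formula, to_formula_alt, htxt]
    rw [scan_eq_wrap _ _ _ hhead]

theorem to_formula_changed : Claim_changed_to_formula := by
  unfold Claim_changed_to_formula
  exact ⟨by decide, by decide, by decide, by rfl, by simp [to_formula_alt, wrapRunsB, pvDiffWitness_to_formula, pvDiffWitnessOut_to_formula, show PySem.Chars.isdigit '2' = true from by decide, show PySem.Chars.isdigit 'O' = false from by decide], by decide⟩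

theorem to_formula_tight : Claim_exact_to_formula := by
  intro frm fmt _ _ hD heq
  rcases hD with ⟨hfmt, hdig⟩
  cases hfrm : frm.toList with
  | nil => simp [hfrm] at hdig
  | cons c cs =>
    have hc : PySem.Chars.isdigit c = true := by simpa [hfrm] using hdig
    have haux := (scan_eq_wrap_joint (c :: cs).length
      (if fmt = "html" then "<sub>".toList else "_{".toList)
      (if fmt = "html" then "</sub>".toList else "}".toList)
      (c :: cs) le_rfl).1 c cs rfl hc
    -- compare first characters of the two results
    have hA : (to_formula frm fmt).toList =
        c :: (cs.takeWhile PySem.Chars.isdigit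
          ++ (if fmt = "html" then "</sub>".toList else "}".toList)
          ++ wrapRunsB (if fmt = "html" then "<sub>".toList else "_{".toList)
              (if fmt = "html" then "</sub>".toList else "}".toList)
              (cs.dropWhile PySem.Chars.isdigit)) := by
      rcases hfmt with h | h <;>
        simp [to_formula, h, hfrm] <;> simpa [h] using haux
    have hB : (to_formula_alt frm fmt).toList =
        (if fmt = "html" then "<sub>".toList else "_{".toList)
          ++ (c :: cs.takeWhile PySem.Chars.isdigit)
          ++ (if fmt = "html" then "</sub>".toList else "}".toList)
          ++ wrapRunsB (if fmt = "html" then "<sub>".toList else "_{".toList)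
              (if fmt = "html" then "</sub>".toList else "}".toList)
              (cs.dropWhile PySem.Chars.isdigit) := by
      rcases hfmt with h | h <;>
        simp [to_formula_alt, h, hfrm, wrapRunsB, hc]
    have : (to_formula frm fmt).toList = (to_formula_alt frm fmt).toList := by rw [heq]
    rw [hA, hB] at this
    rcases hfmt with h | h <;> simp [h] at this <;>
      · rw [this.1] at hc; simp [PySem.Chars.isdigit] at hc
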